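-- pv_equiv track=rewrite | github.com/NaxonM/Altomatic | src/app/views/main_window.py | _compute_step_statuses
-- ===== SOURCE A (Python) =====
-- from typing import Any, Callable, Dict, List, Optional
--
-- def _compute_step_statuses(readiness: List[bool]) -> List[str]:
--     """
--     Compute status strings for each step.
--
--     Args:
--         readiness: List of boolean flags indicating step completion
--
--     Returns:
--         List of status strings ('done', 'active', 'pending')
--     """
--     statuses: List[str] = []
--     first_pending_found = False
--
--     for ready in readiness:
--         if ready:
--             statuses.append("done")
--         else:
--             if not first_pending_found:
--                 statuses.append("active")
--                 first_pending_found = True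
--             else:
--                 statuses.append("pending")
--
--     # Ensure we have exactly 4 statuses
--     while len(statuses) < 4:
--         statuses.append("pending")
--
--     return statuses[:4]
-- ===== SOURCE B (Python) =====
-- from typing import List
--
-- def _compute_step_statuses(readiness: List[bool]) -> List[str]:
--     statuses = ["done" if r else "pending" for r in readiness]
--     try:
--         idx = readiness.index(False)
--         statuses[idx] = "active"
--     except ValueError:
--         pass
--     return (statuses + ["pending"] * 4)[:4]
-- ===== Notes on version B (the rewrite author's own statement) =====
-- stated objective: simpler
-- what changed: Replaces the stateful flag-carrying loop and pad-while-loop by a done/pending map, a single index(False) patch to 'active', and one pad-and-slice expression.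
import Mathlib
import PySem

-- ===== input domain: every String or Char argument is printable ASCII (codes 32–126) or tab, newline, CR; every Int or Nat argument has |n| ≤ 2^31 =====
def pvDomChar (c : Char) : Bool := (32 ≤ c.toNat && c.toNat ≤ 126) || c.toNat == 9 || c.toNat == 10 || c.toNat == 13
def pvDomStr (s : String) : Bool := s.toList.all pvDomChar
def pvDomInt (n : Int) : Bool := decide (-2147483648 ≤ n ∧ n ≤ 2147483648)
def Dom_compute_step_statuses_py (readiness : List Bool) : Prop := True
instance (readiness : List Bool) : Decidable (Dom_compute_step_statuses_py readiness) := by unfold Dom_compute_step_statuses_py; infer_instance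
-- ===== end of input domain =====

-- B is a structurally different decomposition (map + single index patch + pad/slice) with the same return value; neither version mutates its argument.

-- ===== PORT A =====
-- the for-loop over readiness, carrying (statuses, first_pending_found)
def pvLoopA (st : List String × Bool) (ready : Bool) : List String × Bool :=
  if ready then (st.1 ++ ["done"], st.2)
  else if !st.2 then (st.1 ++ ["active"], true)
  else (st.1 ++ ["pending"], true)

-- 'while len(statuses) < 4: statuses.append("pending")'
def pvPadA (st : List String) : List String :=
  if st.length < 4 then pvPadA (st ++ ["pending"]) else st
termination_by 4 - st.length
decreasing_by simp; omega

def compute_step_statuses_py (readiness : List Bool) : List String :=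
  let st := readiness.foldl pvLoopA ([], false)
  -- statuses[:4]
  PySem.List.slice (pvPadA st.1) none (some 4)

-- ===== PORT B =====
def compute_step_statuses_py_alt (readiness : List Bool) : List String :=
  let statuses := readiness.map (fun r => if r then "done" else "pending")
  let statuses :=
    match PySem.List.index? readiness false with   -- readiness.index(False) / ValueError
    | some idx => statuses.set idx "active"
    | none => statuses
  PySem.List.slice (statuses ++ List.replicate 4 "pending") none (some 4)

-- ===== PRECONDITION & SPEC =====
def Spec_compute_step_statuses_py (readiness : List Bool) (out : List String) : Prop := out = compute_step_statuses_py_alt readiness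
instance (readiness : List Bool) (out : List String) : Decidable (Spec_compute_step_statuses_py readiness out) := by unfold Spec_compute_step_statuses_py; infer_instance

-- ===== CLAIM (what is proved, stated in full; the proofs are below) =====
def Claim_equal_compute_step_statuses_py : Prop := ∀ (readiness : List Bool), Dom_compute_step_statuses_py readiness → Spec_compute_step_statuses_py readiness (compute_step_statuses_py readiness)

-- ===== LEMMAS AND PROOFS =====

-- proof-side characterisation of A's loop body output
def pvLoopSpec : Bool → List Bool → List String
  | _, [] => []
  | f, true :: rs => "done" :: pvLoopSpec f rs
  | f, false :: rs => (if f then "pending" else "active") :: pvLoopSpec true rs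

theorem pvFoldA_eq (rs : List Bool) : ∀ (acc : List String) (f : Bool),
    rs.foldl pvLoopA (acc, f) = (acc ++ pvLoopSpec f rs, f || rs.any (fun r => !r)) := by
  induction rs with
  | nil => intro acc f; simp [pvLoopSpec]
  | cons r rs ih =>
    intro acc f
    cases r <;> cases f <;> simp [pvLoopA, pvLoopSpec, ih]

theorem pvLoopSpec_true (rs : List Bool) :
    pvLoopSpec true rs = rs.map (fun r => if r then "done" else "pending") := by
  induction rs with
  | nil => rfl
  | cons r rs ih => cases r <;> simp [pvLoopSpec, ih]

theorem pvLoopSpec_no_false (rs : List Bool) (h : false ∉ rs) (f : Bool) :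
    pvLoopSpec f rs = rs.map (fun r => if r then "done" else "pending") := by
  induction rs generalizing f with
  | nil => rfl
  | cons r rs ih =>
    cases r
    · exact absurd (List.mem_cons_self) h
    · simp at h; simp [pvLoopSpec, ih h]

theorem pvSet_mid {α : Type} (xs : List α) (a b : α) : ∀ ys : List α,
    (xs ++ a :: ys).set xs.length b = xs ++ b :: ys := by
  induction xs with
  | nil => intro ys; rfl
  | cons x xs ih => intro ys; simp [ih]

theorem pvLoopSpec_false_patch (rs : List Bool) :
    pvLoopSpec false rs =
      (match PySem.List.index? rs false with
       | some idx => (rs.map (fun r => if r then "done" else "pending")).set idx "active"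
       | none => rs.map (fun r => if r then "done" else "pending")) := by
  cases h : PySem.List.index? rs false with
  | none =>
    have : false ∉ rs := (PySem.List.index?_eq_none_iff rs false).mp h
    simp [pvLoopSpec_no_false rs this]
  | some idx =>
    obtain ⟨pre, suf, hrs, hlen, hpre⟩ := (PySem.List.index?_eq_some_iff rs false idx).mp h
    subst hrs; subst hlen
    have patch : pvLoopSpec false (pre ++ false :: suf) =
        pre.map (fun r => if r then "done" else "pending") ++ "active" :: pvLoopSpec true suf := by
      clear h
      induction pre with
      | nil => simp [pvLoopSpec]
      | cons p ps ih =>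
        cases p
        · exact absurd List.mem_cons_self hpre
        · simp at hpre
          simp [pvLoopSpec, ih hpre]
    rw [patch, pvLoopSpec_true]
    have : (pre ++ false :: suf).map (fun r => if r then "done" else "pending") =
        pre.map (fun r => if r then "done" else "pending") ++
          "pending" :: suf.map (fun r => if r then "done" else "pending") := by simp
    rw [this]
    have := pvSet_mid (pre.map (fun r => if r then "done" else "pending")) "pending" "active"
      (suf.map (fun r => if r then "done" else "pending"))
    simp at this ⊢

theorem pvPadA_eq (st : List String) :
    pvPadA st = st ++ List.replicate (4 - st.length) "pending" := by
  by_cases h : st.length < 4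
  · rw [pvPadA]
    simp only [h, if_true]
    rw [pvPadA_eq (st ++ ["pending"])]
    have : (4 - st.length) = (4 - (st ++ ["pending"]).length) + 1 := by simp; omega
    rw [this, List.replicate_succ]
    simp
  · rw [pvPadA]
    simp only [h, if_false]
    have : 4 - st.length = 0 := by omega
    simp [this]
termination_by 4 - st.length
decreasing_by simp; omega

theorem pvTake_pad (st : List String) :
    (st ++ List.replicate (4 - st.length) "pending").take 4 =
    (st ++ List.replicate 4 "pending").take 4 := by
  rw [List.take_append, List.take_append, List.take_replicate, List.take_replicate]
  have : min (4 - st.length) (4 - st.length) = min (4 - st.length) 4 := by omega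
  rw [this]

-- ===== VERDICT (by name: the statement is the Claim_ definition above) =====
theorem compute_step_statuses_py_spec : Claim_equal_compute_step_statuses_py := by
  intro readiness _
  unfold Spec_compute_step_statuses_py compute_step_statuses_py compute_step_statuses_py_alt
  simp only [pvFoldA_eq readiness [] false, List.nil_append]
  rw [pvLoopSpec_false_patch, pvPadA_eq]
  rw [PySem.List.slice_to _ (by norm_num), PySem.List.slice_to _ (by norm_num)]
  cases h : PySem.List.index? readiness false with
  | none => exact pvTake_pad _
  | some idx => exact pvTake_pad _
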